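-- pv_equiv track=rewrite | github.com/kitakou0313/cracking-the-code-interview | cracking-the-code-interview/chap16_21.py | findPairEqualizingSums
-- ===== SOURCE A (Python) =====
-- def findPairEqualizingSums(arr1, arr2):
--     arr1 = sorted(arr1)
--     arr2 = sorted(arr2)
--
--     sumOfarr1 = sum(arr1)
--     sumOfarr2 = sum(arr2)
--
--     diff = sumOfarr1 - sumOfarr2
--     if diff % 2 == 1:
--         return None
--
--     diff = diff // 2
--
--     indOf2 = 0
--     for indOf1 in range(len(arr1)):
--         while arr1[indOf1] > (arr2[indOf2] + diff):
--             indOf2 += 1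
--             if indOf2 == len(arr2):
--                 return None
--
--         if arr1[indOf1] == (arr2[indOf2] + diff):
--             return (arr1[indOf1], arr2[indOf2])
--
--     return None
-- ===== SOURCE B (Python) =====
-- def findPairEqualizingSums(arr1, arr2):
--     diff = sum(arr1) - sum(arr2)
--     if diff % 2 == 1:
--         return None
--     diff = diff // 2
--     values = set(arr2)
--     best = None
--     for a in arr1:
--         if a - diff in values and (best is None or a < best):
--             best = a
--     if best is None:
--         return None
--     return (best, best - diff)
-- ===== Notes on version B (the rewrite author's own statement) =====
-- stated objective: faster
-- what changed: Replaces sorting both arrays plus a two-pointer sweep by one unsorted pass over arr1 that tests a - diff against a hash set of arr2 and tracks the smallest matching value.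
import Mathlib
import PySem

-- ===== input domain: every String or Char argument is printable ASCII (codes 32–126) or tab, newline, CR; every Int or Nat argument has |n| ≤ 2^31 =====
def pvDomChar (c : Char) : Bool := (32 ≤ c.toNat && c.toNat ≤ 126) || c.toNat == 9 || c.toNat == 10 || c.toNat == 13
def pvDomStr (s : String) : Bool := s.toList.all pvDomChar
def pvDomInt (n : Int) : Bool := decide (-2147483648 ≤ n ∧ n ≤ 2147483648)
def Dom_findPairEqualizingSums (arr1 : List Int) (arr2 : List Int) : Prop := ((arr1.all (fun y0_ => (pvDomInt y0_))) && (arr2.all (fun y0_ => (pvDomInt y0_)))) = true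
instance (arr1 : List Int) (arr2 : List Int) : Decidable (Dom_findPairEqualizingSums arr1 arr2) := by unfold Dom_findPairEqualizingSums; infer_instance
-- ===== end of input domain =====

-- B replaces A's sort-both-arrays + two-pointer sweep by one unsorted pass over arr1 that
-- tests a - diff against a set of arr2's values and tracks the smallest match (objective: faster).

-- ===== PORT A =====
-- the inner `while arr1[indOf1] > arr2[indOf2] + diff: indOf2 += 1; if indOf2 == len(arr2): return None`
-- as a recursion on the remaining suffix of arr2; `none` = the `return None` exit
def pvSkipA (a diff : Int) : List Int → Option (List Int)
  | [] => none
  | b :: rest => if b + diff < a then pvSkipA a diff rest else some (b :: rest)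

-- the `for indOf1 in range(len(arr1))` loop: recursion on the remaining suffix of arr1,
-- carrying the current suffix of arr2 (the pointer indOf2)
def pvLoopA (diff : Int) : List Int → List Int → Option (Int × Int)
  | [], _ => none
  | a :: t1, l2 =>
    match pvSkipA a diff l2 with
    | none => none
    | some [] => none   -- unreachable: pvSkipA never returns `some []`
    | some (b :: rest) => if a = b + diff then some (a, b) else pvLoopA diff t1 (b :: rest)

def findPairEqualizingSums (arr1 : List Int) (arr2 : List Int) : Option (Int × Int) :=
  let s1 := PySem.List.sorted arr1 (fun x => x) false
  let s2 := PySem.List.sorted arr2 (fun x => x) false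
  let diff := s1.sum - s2.sum
  if PySem.Int.mod diff 2 = 1 then none
  else pvLoopA (PySem.Int.floordiv diff 2) s1 s2

-- ===== PORT B =====
def findPairEqualizingSums_alt (arr1 : List Int) (arr2 : List Int) : Option (Int × Int) :=
  let diff := arr1.sum - arr2.sum
  if PySem.Int.mod diff 2 = 1 then none
  else
    let d := PySem.Int.floordiv diff 2
    let values := PySem.Set.ofList arr2
    let best : Option Int := arr1.foldl (fun best a =>
      if (a - d) ∈ values then
        match best with
        | none => some a
        | some m => if a < m then some a else best
      else best) none
    match best with
    | none => none
    | some m => some (m, m - d)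

-- ===== PRECONDITION & SPEC =====
-- Pre_ excludes exactly the inputs on which the Python A raises IndexError: a non-empty
-- arr1 with an empty arr2 and an even sum difference (the while loop reads arr2[0] there).
def Pre_findPairEqualizingSums (arr1 : List Int) (arr2 : List Int) : Prop :=
  arr1 = [] ∨ arr2 ≠ [] ∨ PySem.Int.mod (arr1.sum - arr2.sum) 2 = 1
instance (arr1 : List Int) (arr2 : List Int) : Decidable (Pre_findPairEqualizingSums arr1 arr2) := by unfold Pre_findPairEqualizingSums; infer_instance
def pvWitness_findPairEqualizingSums : List Int × List Int := ([5, 1], [3, 1])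

def Spec_findPairEqualizingSums (arr1 : List Int) (arr2 : List Int) (out : Option (Int × Int)) : Prop := out = findPairEqualizingSums_alt arr1 arr2
instance (arr1 : List Int) (arr2 : List Int) (out : Option (Int × Int)) : Decidable (Spec_findPairEqualizingSums arr1 arr2 out) := by unfold Spec_findPairEqualizingSums; infer_instance

-- ===== CLAIM (what is proved, stated in full; the proofs are below) =====
def Claim_equal_findPairEqualizingSums : Prop := ∀ (arr1 : List Int) (arr2 : List Int), Dom_findPairEqualizingSums arr1 arr2 → Pre_findPairEqualizingSums arr1 arr2 → Spec_findPairEqualizingSums arr1 arr2 (findPairEqualizingSums arr1 arr2)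

-- ===== LEMMAS AND PROOFS =====

-- the min-tracking accumulator step B's loops amount to
def pvCombine (acc : Option Int) (a : Int) : Option Int :=
  match acc with
  | none => some a
  | some m => if a < m then some a else acc

-- the arr1 values that have a partner in arr2
def pvMatches (l1 l2 : List Int) (d : Int) : List Int :=
  l1.filter (fun a => decide ((a - d) ∈ l2))

lemma pv_outerB (l1 l2 : List Int) (d : Int) (best : Option Int) :
    l1.foldl (fun best a =>
      if (a - d) ∈ PySem.Set.ofList l2 then
        match best with
        | none => some a
        | some m => if a < m then some a else best
      else best) best
    = (pvMatches l1 l2 d).foldl pvCombine best := by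
  simp only [pvMatches, List.foldl_filter, PySem.Set.mem_ofList, pvCombine, decide_eq_true_eq]

lemma pv_foldl_combine_some (l : List Int) (m : Int) :
    l.foldl pvCombine (some m) = some (l.foldl min m) := by
  induction l generalizing m with
  | nil => simp
  | cons a t ih =>
    simp only [List.foldl_cons]
    have h : pvCombine (some m) a = some (min m a) := by
      simp only [pvCombine]
      split <;> simp <;> omega
    rw [h, ih]

lemma pv_foldl_combine_none (l : List Int) : l.foldl pvCombine none = l.min? := by
  cases l with
  | nil => rfl
  | cons a t => simp [List.foldl_cons, pvCombine, List.min?, pv_foldl_combine_some]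

lemma pv_min?_perm (l l' : List Int) (h : l.Perm l') : l.min? = l'.min? := by
  cases hl : l'.min? with
  | none =>
    rw [List.min?_eq_none_iff] at hl ⊢
    exact List.perm_nil.1 (hl ▸ h)
  | some m =>
    rw [List.min?_eq_some_iff] at hl ⊢
    exact ⟨h.mem_iff.2 hl.1, fun b hb => hl.2 b (h.mem_iff.1 hb)⟩

lemma pv_find?_congr (l : List Int) (p q : Int → Bool) (h : ∀ x ∈ l, p x = q x) :
    l.find? p = l.find? q := by
  induction l with
  | nil => rfl
  | cons a t ih =>
    have ha := h a (by simp)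
    simp only [List.find?_cons, ha]
    split
    · rfl
    · exact ih fun x hx => h x (by simp [hx])

lemma pv_skipA_none (a d : Int) (l2 : List Int) (h : pvSkipA a d l2 = none) :
    ∀ b ∈ l2, b + d < a := by
  induction l2 with
  | nil => simp
  | cons b t ih =>
    simp only [pvSkipA] at h
    split at h
    · intro x hx
      rcases List.mem_cons.1 hx with rfl | hx
      · assumption
      · exact ih h x hx
    · simp at h

lemma pv_skipA_some (a d : Int) (l2 l2' : List Int) (h : pvSkipA a d l2 = some l2') :
    ∃ pre, l2 = pre ++ l2' ∧ (∀ b ∈ pre, b + d < a) ∧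
      ∃ b0 t, l2' = b0 :: t ∧ ¬ (b0 + d < a) := by
  induction l2 with
  | nil => simp [pvSkipA] at h
  | cons b t ih =>
    simp only [pvSkipA] at h
    split at h
    · obtain ⟨pre, rfl, hpre, rest⟩ := ih h
      exact ⟨b :: pre, rfl, by
        intro x hx
        rcases List.mem_cons.1 hx with rfl | hx
        · assumption
        · exact hpre x hx, rest⟩
    · obtain rfl := Option.some_injective _ h
      exact ⟨[], rfl, by simp, b, t, rfl, by assumption⟩

lemma pv_loopA_find (d : Int) (s1 l2 : List Int)
    (h1 : s1.Pairwise (· ≤ ·)) (h2 : l2.Pairwise (· ≤ ·)) :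
    pvLoopA d s1 l2 = (s1.find? (fun a => decide ((a - d) ∈ l2))).map (fun m => (m, m - d)) := by
  induction s1 generalizing l2 with
  | nil => rfl
  | cons a t1 ih =>
    rw [List.pairwise_cons] at h1
    obtain ⟨ha, ht1⟩ := h1
    simp only [pvLoopA]
    cases hsk : pvSkipA a d l2 with
    | none =>
      have hall := pv_skipA_none a d l2 hsk
      have : (a :: t1).find? (fun a => decide ((a - d) ∈ l2)) = none := by
        rw [List.find?_eq_none]
        intro x hx
        simp only [decide_eq_true_eq]
        intro hmem
        have := hall _ hmem
        rcases List.mem_cons.1 hx with rfl | hx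
        · omega
        · have := ha x hx; omega
      rw [this]; rfl
    | some l2' =>
      obtain ⟨pre, rfl, hpre, b0, t, rfl, hb0⟩ := pv_skipA_some a d _ _ hsk
      have hsub : ∀ x, x ∈ b0 :: t → x ∈ pre ++ b0 :: t := fun x hx => List.mem_append_right _ hx
      show (if a = b0 + d then some (a, b0) else pvLoopA d t1 (b0 :: t)) = _
      by_cases heq : a = b0 + d
      · simp only [heq]
        have hmem : ((a - d) ∈ pre ++ b0 :: t) := by
          apply List.mem_append_right; simp; left; omega
        rw [List.find?_cons_of_pos (by simpa using hmem)]
        simp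
      · rw [if_neg heq]
        have h2' : (b0 :: t).Pairwise (· ≤ ·) := (List.pairwise_append.1 h2).2.1
        have hb0le : ∀ x ∈ b0 :: t, b0 ≤ x := by
          intro x hx
          rcases List.mem_cons.1 hx with rfl | hx
          · exact le_refl x
          · exact (List.pairwise_cons.1 h2').1 x hx
        have hnomem : ¬ ((a - d) ∈ pre ++ b0 :: t) := by
          intro hmem
          rcases List.mem_append.1 hmem with hx | hx
          · have := hpre _ hx; omega
          · have := hb0le _ hx; omega
        rw [List.find?_cons_of_neg (by simpa using hnomem)]
        rw [ih (b0 :: t) ht1 h2']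
        congr 1
        apply pv_find?_congr
        intro x hx
        have hax : a ≤ x := ha x hx
        simp only [decide_eq_decide]
        constructor
        · exact hsub _
        · intro hm
          rcases List.mem_append.1 hm with hp | hp
          · have := hpre _ hp; omega
          · exact hp

lemma pv_find?_sorted_min (s1 : List Int) (p : Int → Bool) (h : s1.Pairwise (· ≤ ·)) :
    s1.find? p = (s1.filter p).min? := by
  induction s1 with
  | nil => rfl
  | cons a t ih =>
    rw [List.pairwise_cons] at h
    obtain ⟨ha, ht⟩ := h
    by_cases hp : p a
    · rw [List.find?_cons_of_pos hp, List.filter_cons_of_pos hp]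
      symm
      rw [List.min?_eq_some_iff]
      refine ⟨by simp, ?_⟩
      intro b hb
      rcases List.mem_cons.1 hb with rfl | hb
      · exact le_refl b
      · exact ha b (List.mem_of_mem_filter hb)
    · rw [List.find?_cons_of_neg hp, List.filter_cons_of_neg hp]
      exact ih ht

-- ===== VERDICT (by name: the statement is the Claim_ definition above) =====
theorem findPairEqualizingSums_spec : Claim_equal_findPairEqualizingSums := by
  intro arr1 arr2 _ _
  unfold Spec_findPairEqualizingSums findPairEqualizingSums findPairEqualizingSums_alt
  have hperm1 : (PySem.List.sorted arr1 (fun x => x) false).Perm arr1 := PySem.List.sorted_perm ..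
  have hperm2 : (PySem.List.sorted arr2 (fun x => x) false).Perm arr2 := PySem.List.sorted_perm ..
  have hsum1 : (PySem.List.sorted arr1 (fun x => x) false).sum = arr1.sum := hperm1.sum_eq
  have hsum2 : (PySem.List.sorted arr2 (fun x => x) false).sum = arr2.sum := hperm2.sum_eq
  simp only [hsum1, hsum2]
  by_cases hm : PySem.Int.mod (arr1.sum - arr2.sum) 2 = 1
  · rw [if_pos hm, if_pos hm]
  · rw [if_neg hm, if_neg hm]
    have hpw1 : (PySem.List.sorted arr1 (fun x => x) false).Pairwise (· ≤ ·) := by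
      simpa using PySem.List.sorted_pairwise arr1 (fun x => x)
    have hpw2 : (PySem.List.sorted arr2 (fun x => x) false).Pairwise (· ≤ ·) := by
      simpa using PySem.List.sorted_pairwise arr2 (fun x => x)
    rw [pv_loopA_find _ _ _ hpw1 hpw2, pv_find?_sorted_min _ _ hpw1, pv_outerB,
      pv_foldl_combine_none]
    have hfil : ((PySem.List.sorted arr1 (fun x => x) false).filter
        (fun a => decide ((a - PySem.Int.floordiv (arr1.sum - arr2.sum) 2) ∈ PySem.List.sorted arr2 (fun x => x) false))).Perm
        (pvMatches arr1 arr2 (PySem.Int.floordiv (arr1.sum - arr2.sum) 2)) := by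
      rw [List.filter_congr (q := fun a => decide ((a - PySem.Int.floordiv (arr1.sum - arr2.sum) 2) ∈ arr2))
        (by intro x _; simp [PySem.List.mem_sorted])]
      exact hperm1.filter _
    rw [pv_min?_perm _ _ hfil]
    cases (pvMatches arr1 arr2 (PySem.Int.floordiv (arr1.sum - arr2.sum) 2)).min? <;> simp
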